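-- pv_equiv track=rewrite | github.com/UWBCoevolution/dvh_mms2 | lost_polymorphisms.py | get_suspect_html_frequencies
-- ===== SOURCE A (Python) =====
-- def get_suspect_html_frequencies(generation_frequencies_dict):
--     '''
--     Input: dictionary of mutation frequencies from get_generation_frequencies()
--     Output: dictionary subset of input, only containing values with frequency patterns '100% - 0% - 100%'.
--     Key: (reference genome ID, position of mutation, mutation)
--     Value: [ancestor frequency, generation 100 f, gen 300 f, gen 500 f, gen 780 f, gen 1000 f]
--     '''
--     suspect_frequencies_dict = {}
--     for key, value in generation_frequencies_dict.items():
--         counter = 1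
--         while counter <= len(value):
--             if counter + 1 < len(value):
--                 if value[counter] == None:
--                     if value[counter - 1] == '100%' or value[counter + 1] == '100%':
--                         suspect_frequencies_dict[key] = value
--                 elif value[counter] == '100%':
--                     if value[counter - 1] == None or value[counter + 1] == None:
--                         suspect_frequencies_dict[key] = value
--             elif counter + 1 == len(value):
--                 if value[counter] == None and value[counter - 1] == '100%':
--                     suspect_frequencies_dict[key] = value
--                 elif value[counter] == '100%' and value[counter - 1] == None:
--                     suspect_frequencies_dict[key] = value
--             counter += 2
--     return suspect_frequencies_dict
-- ===== SOURCE B (Python) =====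
-- def _suspicious_pair(a, b):
--     return (a is None and b == '100%') or (a == '100%' and b is None)
--
-- def get_suspect_html_frequencies(generation_frequencies_dict):
--     return {key: value
--             for key, value in generation_frequencies_dict.items()
--             if any(_suspicious_pair(a, b) for a, b in zip(value, value[1:]))}
-- ===== Notes on version B (the rewrite author's own statement) =====
-- stated objective: simpler
-- what changed: Replaced A's step-2 center-walk over odd indices with three-way neighbour tests and a mutated result dict by a single dict comprehension that keeps an entry iff any adjacent pair in its value is one None and one '100%' (zip of the value with its own tail).
import Mathlib
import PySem

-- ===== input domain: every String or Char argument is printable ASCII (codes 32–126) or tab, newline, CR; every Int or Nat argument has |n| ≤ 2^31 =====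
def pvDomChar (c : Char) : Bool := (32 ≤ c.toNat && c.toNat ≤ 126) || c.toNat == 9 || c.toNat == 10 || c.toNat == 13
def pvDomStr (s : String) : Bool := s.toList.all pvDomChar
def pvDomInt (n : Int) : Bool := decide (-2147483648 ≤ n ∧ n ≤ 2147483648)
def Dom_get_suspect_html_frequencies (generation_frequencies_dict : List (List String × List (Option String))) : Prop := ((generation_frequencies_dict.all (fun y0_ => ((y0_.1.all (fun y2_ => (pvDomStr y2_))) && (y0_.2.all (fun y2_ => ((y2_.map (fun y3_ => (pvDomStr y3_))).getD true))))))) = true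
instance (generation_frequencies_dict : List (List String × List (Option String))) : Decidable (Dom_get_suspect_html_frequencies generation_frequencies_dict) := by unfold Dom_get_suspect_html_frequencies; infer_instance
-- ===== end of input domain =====

-- B replaces A's step-2 center-walk (odd indices, three-way neighbour tests, dict mutation)
-- by one dict comprehension keeping entries whose value has an adjacent None/'100%' pair: simpler.


-- ===== PORT A =====
-- the inner `while counter <= len(value): … counter += 2` loop of A; every value[i] access is
-- guarded so the index is in range, hence List.getD is exact for Python's value[i]
def pvAStep (key : List String) (value : List (Option String))
    (d : PySem.Dict (List String) (List (Option String))) (counter : Nat) :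
    PySem.Dict (List String) (List (Option String)) :=
  if h : counter ≤ value.length then
    let d' :=
      if counter + 1 < value.length then
        if value.getD counter none == none then
          if value.getD (counter - 1) none == some "100%" || value.getD (counter + 1) none == some "100%" then
            d.insert key value
          else d
        else if value.getD counter none == some "100%" then
          if value.getD (counter - 1) none == none || value.getD (counter + 1) none == none then
            d.insert key value
          else d
        else d
      else if counter + 1 = value.length then
        if value.getD counter none == none && value.getD (counter - 1) none == some "100%" then
          d.insert key value
        else if value.getD counter none == some "100%" && value.getD (counter - 1) none == none then
          d.insert key value
        else d
      else d
    pvAStep key value d' (counter + 2)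
  else d
termination_by value.length + 1 - counter
decreasing_by omega

def get_suspect_html_frequencies (generation_frequencies_dict : List (List String × List (Option String))) : List (List String × List (Option String)) :=
  (generation_frequencies_dict.foldl
    (fun d kv => pvAStep kv.1 kv.2 d 1)
    (PySem.Dict.empty : PySem.Dict (List String) (List (Option String)))).items

-- ===== PORT B =====
def pvSuspiciousPair (a b : Option String) : Bool :=
  (a == none && b == some "100%") || (a == some "100%" && b == none)

def get_suspect_html_frequencies_alt (generation_frequencies_dict : List (List String × List (Option String))) : List (List String × List (Option String)) :=
  generation_frequencies_dict.filter
    (fun kv => (kv.2.zip (PySem.List.slice kv.2 (some 1) none)).any (fun p => pvSuspiciousPair p.1 p.2))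

-- ===== PRECONDITION & SPEC =====
-- Pre_ excludes association lists with duplicate keys: A's argument is a Python dict, whose keys
-- are necessarily distinct, so no input A actually accepts is excluded.
def Pre_get_suspect_html_frequencies (generation_frequencies_dict : List (List String × List (Option String))) : Prop :=
  (generation_frequencies_dict.map Prod.fst).Nodup
instance (generation_frequencies_dict : List (List String × List (Option String))) : Decidable (Pre_get_suspect_html_frequencies generation_frequencies_dict) := by unfold Pre_get_suspect_html_frequencies; infer_instance

def pvWitness_get_suspect_html_frequencies : (List (List String × List (Option String))) :=
  [(["chr1"], [some "100%", none, some "0%"]), (["chr2"], [some "0%", some "0%"])]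

def Spec_get_suspect_html_frequencies (generation_frequencies_dict : List (List String × List (Option String))) (out : List (List String × List (Option String))) : Prop := out = get_suspect_html_frequencies_alt generation_frequencies_dict
instance (generation_frequencies_dict : List (List String × List (Option String))) (out : List (List String × List (Option String))) : Decidable (Spec_get_suspect_html_frequencies generation_frequencies_dict out) := by unfold Spec_get_suspect_html_frequencies; infer_instance

-- ===== CLAIM (what is proved, stated in full; the proofs are below) =====
def Claim_equal_get_suspect_html_frequencies : Prop := ∀ (generation_frequencies_dict : List (List String × List (Option String))), Dom_get_suspect_html_frequencies generation_frequencies_dict → Pre_get_suspect_html_frequencies generation_frequencies_dict → Spec_get_suspect_html_frequencies generation_frequencies_dict (get_suspect_html_frequencies generation_frequencies_dict)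

-- ===== LEMMAS AND PROOFS =====

-- "some adjacent pair of value at index ≥ j is suspicious", indexed form
def pvPairFrom (v : List (Option String)) (j : Nat) : Bool :=
  if h : j + 1 < v.length then
    pvSuspiciousPair (v.getD j none) (v.getD (j + 1) none) || pvPairFrom v (j + 1)
  else false
termination_by v.length - j
decreasing_by omega

lemma pvPairFrom_cons (x : Option String) (v : List (Option String)) (j : Nat) :
    pvPairFrom (x :: v) (j + 1) = pvPairFrom v j := by
  fun_induction pvPairFrom v j with
  | case1 j h ih =>
      rw [pvPairFrom]
      simp only [List.length_cons]
      rw [dif_pos (by omega)]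
      simp [ih]
  | case2 j h =>
      rw [pvPairFrom]
      rw [dif_neg (by simp; omega)]

lemma zip_tail_eq_pvPairFrom (v : List (Option String)) :
    (v.zip v.tail).any (fun p => pvSuspiciousPair p.1 p.2) = pvPairFrom v 0 := by
  induction v with
  | nil => rw [pvPairFrom]; simp
  | cons x t ih =>
      cases t with
      | nil => rw [pvPairFrom]; simp
      | cons y u =>
          rw [pvPairFrom]
          simp only [List.tail_cons, List.zip_cons_cons, List.any_cons]
          rw [pvPairFrom_cons, ← ih]
          simp

-- interior-step identity of A's loop body, abstract values
lemma step_ident (d : PySem.Dict (List String) (List (Option String))) (k : List String)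
    (v : List (Option String)) (xp xc xn : Option String) (r : Bool) :
    (if r then
        (if xc == none then
            (if xp == some "100%" || xn == some "100%" then d.insert k v else d)
          else if xc == some "100%" then
            (if xp == none || xn == none then d.insert k v else d)
          else d).insert k v
      else
        (if xc == none then
            (if xp == some "100%" || xn == some "100%" then d.insert k v else d)
          else if xc == some "100%" then
            (if xp == none || xn == none then d.insert k v else d)
          else d))
    = if (pvSuspiciousPair xp xc || (pvSuspiciousPair xc xn || r)) then d.insert k v else d := by
  rcases xc with _ | sc <;> rcases xp with _ | sp <;> rcases xn with _ | sn <;>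
    cases r <;>
    simp [pvSuspiciousPair] <;> split_ifs <;>
    simp_all [PySem.Dict.insert_insert_self]

lemma last_ident (d : PySem.Dict (List String) (List (Option String))) (k : List String)
    (v : List (Option String)) (xp xc : Option String) :
    (if xc == none && xp == some "100%" then d.insert k v
      else if xc == some "100%" && xp == none then d.insert k v else d)
    = if pvSuspiciousPair xp xc then d.insert k v else d := by
  rcases xc with _ | sc <;> rcases xp with _ | sp <;>
    simp [pvSuspiciousPair]

lemma pvAStep_eq (n : Nat) : ∀ (v : List (Option String)) (c : Nat)
    (d : PySem.Dict (List String) (List (Option String))) (k : List String),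
    v.length + 1 - c ≤ n → 1 ≤ c →
    pvAStep k v d c = if pvPairFrom v (c - 1) then d.insert k v else d := by
  induction n with
  | zero =>
      intro v c d k hn hc
      rw [pvAStep, dif_neg (by omega), pvPairFrom, dif_neg (by omega)]
      simp
  | succ n ih =>
      intro v c d k hn hc
      by_cases h : c ≤ v.length
      · rw [pvAStep, dif_pos h]
        simp only
        rw [ih v (c + 2) _ k (by omega) (by omega)]
        have hc1 : c + 2 - 1 = c + 1 := by omega
        rw [hc1]
        by_cases h1 : c + 1 < v.length
        · rw [if_pos h1]
          have e1 : pvPairFrom v (c - 1)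
              = (pvSuspiciousPair (v.getD (c-1) none) (v.getD c none)
                 || (pvSuspiciousPair (v.getD c none) (v.getD (c+1) none) || pvPairFrom v (c+1))) := by
            rw [pvPairFrom, dif_pos (by omega)]
            have : c - 1 + 1 = c := by omega
            rw [this, pvPairFrom, dif_pos (by omega)]
          rw [e1]
          exact step_ident d k v (v.getD (c-1) none) (v.getD c none) (v.getD (c+1) none) _
        · by_cases h2 : c + 1 = v.length
          · rw [if_neg h1, if_pos h2]
            have hf : pvPairFrom v (c + 1) = false := by
              rw [pvPairFrom, dif_neg (by omega)]
            rw [hf]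
            simp only [Bool.false_eq_true, if_false]
            have e1 : pvPairFrom v (c - 1) = pvSuspiciousPair (v.getD (c-1) none) (v.getD c none) := by
              rw [pvPairFrom, dif_pos (by omega)]
              have : c - 1 + 1 = c := by omega
              rw [this, pvPairFrom, dif_neg (by omega)]
              simp
            rw [e1]
            exact last_ident d k v (v.getD (c-1) none) (v.getD c none)
          · rw [if_neg h1, if_neg h2]
            have hf : pvPairFrom v (c + 1) = false := by
              rw [pvPairFrom, dif_neg (by omega)]
            have e1 : pvPairFrom v (c - 1) = false := by
              rw [pvPairFrom, dif_neg (by omega)]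
            rw [hf, e1]
      · rw [pvAStep, dif_neg h, pvPairFrom, dif_neg (by omega)]
        simp

lemma fold_eq : ∀ (l : List (List String × List (Option String)))
    (d : PySem.Dict (List String) (List (Option String))),
    d.keys.Nodup → (∀ p ∈ l, d.contains p.1 = false) → (l.map Prod.fst).Nodup →
    (l.foldl (fun d kv => pvAStep kv.1 kv.2 d 1) d).items
      = d.items ++ l.filter (fun kv => pvPairFrom kv.2 0) := by
  intro l
  induction l with
  | nil => intro d _ _ _; simp
  | cons p t ih =>
      intro d hnd hco hkeys
      simp only [List.foldl_cons]
      rw [pvAStep_eq (p.2.length + 1) p.2 1 d p.1 (by omega) (by omega)]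
      simp only [Nat.sub_self]  -- 1 - 1 = 0
      have hdp : d.contains p.1 = false := hco p (List.mem_cons_self ..)
      by_cases hf : pvPairFrom p.2 0
      · rw [if_pos hf]
        rw [ih (d.insert p.1 p.2)
            (PySem.Dict.nodup_keys_insert d p.1 p.2 hnd)
            (by
              intro q hq
              rw [PySem.Dict.contains_insert]
              have h1 : q.1 ≠ p.1 := by
                have h2 := (List.nodup_cons.mp hkeys).1
                intro he
                exact h2 (he ▸ List.mem_map_of_mem hq)
              simp [h1, hco q (List.mem_cons_of_mem _ hq)])
            ((List.nodup_cons.mp hkeys).2)]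
        rw [PySem.Dict.items_insert_of_not_contains d p.2 hdp]
        simp [hf]
      · rw [if_neg hf]
        rw [ih d hnd (fun q hq => hco q (List.mem_cons_of_mem _ hq))
            ((List.nodup_cons.mp hkeys).2)]
        simp [hf]


-- ===== VERDICT (by name: the statement is the Claim_ definition above) =====
theorem get_suspect_html_frequencies_spec : Claim_equal_get_suspect_html_frequencies := by
  intro l _hdom hpre
  unfold Spec_get_suspect_html_frequencies get_suspect_html_frequencies get_suspect_html_frequencies_alt
  rw [fold_eq l PySem.Dict.empty PySem.Dict.nodup_keys_empty
      (fun p _ => PySem.Dict.contains_empty p.1) hpre]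
  have he : (PySem.Dict.empty : PySem.Dict (List String) (List (Option String))).items = [] := rfl
  rw [he, List.nil_append]
  refine List.filter_congr ?_
  intro kv _
  rw [PySem.List.slice_from_one, zip_tail_eq_pvPairFrom]
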